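-- pv_equiv track=rewrite | github.com/cupacdj/ISdomaci1 | algorithms.py | int_to_coordinates
-- ===== SOURCE A (Python) =====
-- def int_to_coordinates(grid, rows, columns):
--     coordinates = []
--     for index in range(rows * columns):
--         if grid & (1 << index):
--             row = index // columns
--             col = index % columns
--             coordinates.append((row, col))
--     return coordinates
-- ===== SOURCE B (Python) =====
-- def int_to_coordinates(grid, rows, columns):
--     n = rows * columns
--     if n <= 0:
--         return []
--     if 0 <= grid and grid.bit_length() <= n:
--         m = grid  # masking to n bits would change nothing
--     else:
--         m = grid & ((1 << n) - 1)
--     coordinates = []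
--     while m:
--         rest = m & (m - 1)  # m with its lowest set bit cleared
--         index = (m ^ rest).bit_length() - 1
--         coordinates.append((index // columns, index % columns))
--         m = rest
--     return coordinates
-- ===== Notes on version B (the rewrite author's own statement) =====
-- stated objective: faster
-- what changed: Instead of testing every index in range(rows*columns), B masks the grid to rows*columns bits and extracts only the set bits one at a time via lowest-set-bit clearing (m & (m-1)), so the loop runs once per set cell.
import Mathlib
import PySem

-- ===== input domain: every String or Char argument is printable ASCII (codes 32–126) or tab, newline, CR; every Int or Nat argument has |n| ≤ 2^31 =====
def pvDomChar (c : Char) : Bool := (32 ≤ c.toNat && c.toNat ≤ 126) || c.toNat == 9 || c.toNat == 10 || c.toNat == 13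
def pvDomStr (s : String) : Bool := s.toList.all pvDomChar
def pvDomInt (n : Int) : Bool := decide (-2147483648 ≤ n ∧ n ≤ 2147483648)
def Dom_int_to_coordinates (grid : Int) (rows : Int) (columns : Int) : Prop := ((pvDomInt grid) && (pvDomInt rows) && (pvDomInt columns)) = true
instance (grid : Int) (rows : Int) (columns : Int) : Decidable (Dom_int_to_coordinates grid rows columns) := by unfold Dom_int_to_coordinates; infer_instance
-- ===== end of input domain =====

-- B replaces A's scan of every index in range(rows*columns) by lowest-set-bit extraction
-- on the grid masked to rows*columns bits, looping only once per set cell.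

-- ===== PORT A =====
def int_to_coordinates (grid : Int) (rows : Int) (columns : Int) : List (Int × Int) :=
  (PySem.List.pyRange 0 (rows * columns) 1).foldl
    (fun acc index =>
      if PySem.Int.band grid ((1 : Int) <<< (index.toNat : Nat)) ≠ 0 then
        acc ++ [(PySem.Int.floordiv index columns, PySem.Int.mod index columns)]
      else acc) []

-- ===== PORT B =====
-- the while loop of Source B: extract the lowest set bit of m until m = 0
-- (m is Python's nonnegative int loop state, held as a Nat)
def pvAltLoop (columns : Int) (m : Nat) : List (Int × Int) :=
  if m = 0 then []
  else
    let rest := m &&& (m - 1)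
    let index : Int := (PySem.Int.bitLength ((m ^^^ rest : Nat) : Int) : Int) - 1
    (PySem.Int.floordiv index columns, PySem.Int.mod index columns) :: pvAltLoop columns rest
termination_by m
decreasing_by
  have h1 : m &&& (m - 1) ≤ m - 1 := Nat.and_le_right
  omega

def int_to_coordinates_alt (grid : Int) (rows : Int) (columns : Int) : List (Int × Int) :=
  let n := rows * columns
  if n ≤ 0 then []
  else
    let m : Nat :=
      if 0 ≤ grid ∧ (PySem.Int.bitLength grid : Int) ≤ n then grid.toNat
      else (PySem.Int.band grid (((1 : Int) <<< (n.toNat : Nat)) - 1)).toNat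
    pvAltLoop columns m

-- ===== PRECONDITION & SPEC =====
def Spec_int_to_coordinates (grid : Int) (rows : Int) (columns : Int) (out : List (Int × Int)) : Prop := out = int_to_coordinates_alt grid rows columns
instance (grid : Int) (rows : Int) (columns : Int) (out : List (Int × Int)) : Decidable (Spec_int_to_coordinates grid rows columns out) := by unfold Spec_int_to_coordinates; infer_instance

-- ===== CLAIM (what is proved, stated in full; the proofs are below) =====
def Claim_equal_int_to_coordinates : Prop := ∀ (grid : Int) (rows : Int) (columns : Int), Dom_int_to_coordinates grid rows columns → Spec_int_to_coordinates grid rows columns (int_to_coordinates grid rows columns)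

-- ===== LEMMAS AND PROOFS =====

-- ===== PRECONDITION & SPEC =====


theorem pv_and_add_ldiff (x : Nat) : ∀ y, (x &&& y) + x.ldiff y = x := by
  induction x using Nat.binaryRec with
  | zero =>
    intro y
    apply Nat.eq_of_testBit_eq
    simp [Nat.testBit_ldiff]
  | bit a m ih =>
    intro y
    rw [← Nat.bit_testBit_zero_shiftRight_one y, Nat.land_bit, Nat.ldiff_bit]
    have := ih (y >>> 1)
    rcases a <;> rcases h : y.testBit 0 <;>
      simp [Nat.bit] <;> omega

theorem pv_band_eq_land (a b : Int) : PySem.Int.band a b = Int.land a b := by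
  rcases a with m | m <;> rcases b with n | n <;>
    simp only [PySem.Int.band, Int.land]
  · simp
  · have h0 : ¬ (0 : Int) ≤ Int.negSucc n := by rw [Int.negSucc_eq]; omega
    have h1 : (0:Int) ≤ Int.ofNat m := Int.natCast_nonneg m
    have h2 : (-(Int.negSucc n) - 1) = Int.ofNat n := by
      rw [Int.negSucc_eq, Int.ofNat_eq_natCast]; ring
    rw [if_pos h1, if_neg h0, h2]
    have := pv_and_add_ldiff m n
    have h3 : (Int.ofNat m).toNat = m := rfl
    have h4 : (Int.ofNat n).toNat = n := rfl
    rw [h3, h4]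
    congr 1
    omega
  · have h0 : ¬ (0 : Int) ≤ Int.negSucc m := by rw [Int.negSucc_eq]; omega
    have h1 : (0:Int) ≤ Int.ofNat n := Int.natCast_nonneg n
    have h2 : (-(Int.negSucc m) - 1) = Int.ofNat m := by
      rw [Int.negSucc_eq, Int.ofNat_eq_natCast]; ring
    rw [if_neg h0, if_pos h1, h2]
    have := pv_and_add_ldiff n m
    have h3 : (Int.ofNat m).toNat = m := rfl
    have h4 : (Int.ofNat n).toNat = n := rfl
    rw [h3, h4]
    congr 1
    omega
  · have h0 : ¬ (0 : Int) ≤ Int.negSucc m := by rw [Int.negSucc_eq]; omega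
    have h0' : ¬ (0 : Int) ≤ Int.negSucc n := by rw [Int.negSucc_eq]; omega
    have h2 : (-(Int.negSucc m) - 1) = Int.ofNat m := by
      rw [Int.negSucc_eq, Int.ofNat_eq_natCast]; ring
    have h2' : (-(Int.negSucc n) - 1) = Int.ofNat n := by
      rw [Int.negSucc_eq, Int.ofNat_eq_natCast]; ring
    rw [if_neg h0, if_neg h0', h2, h2']
    have h3 : (Int.ofNat m).toNat = m := rfl
    have h4 : (Int.ofNat n).toNat = n := rfl
    rw [h3, h4, Int.negSucc_eq]
    ring

theorem pv_shift_one (k : Nat) : (1 : Int) <<< k = ((2^k : Nat) : Int) := by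
  simp [Int.shiftLeft_eq]

theorem pv_cond (g : Int) (k : Nat) :
    (PySem.Int.band g ((1:Int) <<< k) ≠ 0) ↔ g.testBit k = true := by
  rw [pv_band_eq_land, pv_shift_one]
  rcases g with m | m
  · show ((Int.land (Int.ofNat m) (Int.ofNat (2^k)) ≠ 0)) ↔ m.testBit k = true
    simp only [Int.land, Nat.and_two_pow]
    rcases h : m.testBit k <;> simp
  · show ((Int.land (Int.negSucc m) (Int.ofNat (2^k)) ≠ 0)) ↔ (!m.testBit k) = true
    simp only [Int.land]
    have hld : (2^k).ldiff m = if m.testBit k then 0 else 2^k := by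
      apply Nat.eq_of_testBit_eq
      intro i
      rcases h : m.testBit k <;>
        simp [Nat.testBit_ldiff, Nat.testBit_two_pow] <;> intro he <;> simp [← he, h]
    rw [hld]
    rcases h : m.testBit k <;> simp

theorem pv_mask_testBit (g : Int) (N k : Nat) :
    ((PySem.Int.band g (((1:Int) <<< N) - 1)).toNat).testBit k
      = (g.testBit k && decide (k < N)) := by
  rw [pv_band_eq_land, pv_shift_one]
  have hm : ((2^N : Nat) : Int) - 1 = Int.ofNat (2^N - 1) := by
    have : (1:Nat) ≤ 2^N := Nat.one_le_two_pow
    rw [Int.ofNat_eq_natCast]; push_cast [this]; ring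
  rw [hm]
  rcases g with m | m
  · show ((Int.land (Int.ofNat m) (Int.ofNat (2^N - 1))).toNat.testBit k) = _
    simp only [Int.land]
    show (m &&& (2^N - 1)).testBit k = _
    rw [Nat.testBit_and, Nat.testBit_two_pow_sub_one]
    rfl
  · show ((Int.land (Int.negSucc m) (Int.ofNat (2^N - 1))).toNat.testBit k) = _
    simp only [Int.land]
    show ((2^N - 1).ldiff m).testBit k = _
    rw [Nat.testBit_ldiff, Nat.testBit_two_pow_sub_one]
    show _ = ((!m.testBit k) && _)
    rcases m.testBit k <;> rcases Nat.decLt k N <;> simp_all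

theorem pv_mask_lt (g : Int) (N : Nat) :
    (PySem.Int.band g (((1:Int) <<< N) - 1)).toNat < 2^N := by
  apply Nat.lt_pow_two_of_testBit
  intro i hi
  rw [pv_mask_testBit]
  simp [Nat.not_lt.mpr hi]

theorem pv_branch (g : Int) (N : Nat) (hg : 0 ≤ g) (hb : PySem.Int.bitLength g ≤ N) :
    g.toNat = (PySem.Int.band g (((1:Int) <<< N) - 1)).toNat := by
  have hmask : (0:Int) ≤ ((1:Int) <<< N) - 1 := by
    rw [pv_shift_one]
    have : (1:Nat) ≤ 2^N := Nat.one_le_two_pow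
    omega
  rw [PySem.Int.band_of_nonneg hg hmask]
  have ht : (((1:Int) <<< N) - 1).toNat = 2^N - 1 := by
    rw [pv_shift_one]
    have : (1:Nat) ≤ 2^N := Nat.one_le_two_pow
    omega
  rw [ht, Int.toNat_natCast, Nat.and_two_pow_sub_one_eq_mod]
  have hlt : g.toNat < 2^N := by
    have h1 := PySem.Int.lt_two_pow_bitLength g
    have h2 : g.natAbs = g.toNat := by omega
    calc g.toNat = g.natAbs := h2.symm
      _ < 2^PySem.Int.bitLength g := h1
      _ ≤ 2^N := Nat.pow_le_pow_right (by norm_num) hb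
  exact (Nat.mod_eq_of_lt hlt).symm

def pvBitIdx (m : Nat) : List Nat :=
  if m = 0 then []
  else
    let rest := m &&& (m - 1)
    (PySem.Int.bitLength ((m ^^^ rest : Nat) : Int) - 1) :: pvBitIdx rest
termination_by m
decreasing_by
  have h1 : m &&& (m - 1) ≤ m - 1 := Nat.and_le_right
  omega

theorem pv_rest_lt {m : Nat} (h : m ≠ 0) : m &&& (m - 1) < m := by
  have h1 : m &&& (m - 1) ≤ m - 1 := Nat.and_le_right
  omega

theorem pv_low_pos {m : Nat} (h : m ≠ 0) : 0 < m ^^^ (m &&& (m - 1)) := by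
  rcases Nat.eq_zero_or_pos (m ^^^ (m &&& (m - 1))) with h0 | h0
  · exfalso
    have := Nat.xor_eq_zero_iff.mp h0
    have := pv_rest_lt h
    omega
  · exact h0

theorem pv_bitLength_pos {m : Nat} (h : 0 < m) : 1 ≤ PySem.Int.bitLength (m : Int) := by
  by_contra hb
  have h1 := PySem.Int.lt_two_pow_bitLength (m : Int)
  have h0 : PySem.Int.bitLength (m : Int) = 0 := by omega
  rw [h0] at h1
  simp at h1
  omega

theorem pv_and_double {k : Nat} (h : k ≠ 0) :
    (2*k) &&& (2*k - 1) = 2 * (k &&& (k - 1)) := by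
  have h1 : 2*k = Nat.bit false k := by simp [Nat.bit]
  have h2 : 2*k - 1 = Nat.bit true (k - 1) := by simp [Nat.bit]; omega
  rw [h2, h1, Nat.land_bit]
  simp [Nat.bit]

theorem pv_xor_double (a b : Nat) : (2*a) ^^^ (2*b) = 2 * (a ^^^ b) := by
  have h1 : 2*a = Nat.bit false a := by simp [Nat.bit]
  have h2 : 2*b = Nat.bit false b := by simp [Nat.bit]
  rw [h1, h2, Nat.xor_bit]
  simp [Nat.bit]

theorem pv_and_odd (k : Nat) : (2*k + 1) &&& (2*k) = 2*k := by
  have h1 : 2*k + 1 = Nat.bit true k := by simp [Nat.bit]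
  have h2 : 2*k = Nat.bit false k := by simp [Nat.bit]
  rw [h1, h2, Nat.land_bit]
  simp [Nat.bit]

theorem pv_xor_odd (k : Nat) : (2*k + 1) ^^^ (2*k) = 1 := by
  have h1 : 2*k + 1 = Nat.bit true k := by simp [Nat.bit]
  have h2 : 2*k = Nat.bit false k := by simp [Nat.bit]
  rw [h1, h2, Nat.xor_bit]
  simp [Nat.bit]

theorem pv_bitLength_double {x : Nat} (h : 0 < x) :
    PySem.Int.bitLength ((2*x : Nat) : Int) = PySem.Int.bitLength (x : Int) + 1 := by
  have := PySem.Int.bitLength_natCast (m := 2*x) (by omega)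
  rw [this]
  congr 2
  omega

theorem pvBitIdx_double (k : Nat) : pvBitIdx (2*k) = (pvBitIdx k).map (· + 1) := by
  induction k using Nat.strong_induction_on with
  | _ k ih =>
    rcases Nat.eq_zero_or_pos k with h0 | h0
    · subst h0; simp [pvBitIdx]
    have hk : k ≠ 0 := by omega
    have h2k : 2*k ≠ 0 := by omega
    rw [pvBitIdx, pvBitIdx, if_neg h2k, if_neg hk]
    simp only [pv_and_double hk, pv_xor_double]
    have hlow := pv_low_pos hk
    rw [pv_bitLength_double hlow]
    rw [ih (k &&& (k - 1)) (pv_rest_lt hk)]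
    simp only [List.map_cons]
    congr 1
    have := pv_bitLength_pos hlow
    omega

theorem pvBitIdx_odd (k : Nat) : pvBitIdx (2*k + 1) = 0 :: (pvBitIdx k).map (· + 1) := by
  rw [pvBitIdx, if_neg (by omega)]
  have hr : (2*k + 1) - 1 = 2*k := by omega
  simp only [hr, pv_and_odd, pv_xor_odd]
  rw [← pvBitIdx_double]
  have h1 : PySem.Int.bitLength (1 : Int) = 1 := by decide
  norm_num [h1]

theorem pvBitIdx_char : ∀ (n : Nat), ∀ m < 2^n, pvBitIdx m = (List.range n).filter m.testBit := by
  intro n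
  induction n with
  | zero =>
    intro m hm
    have : m = 0 := by simpa using hm
    subst this
    simp [pvBitIdx]
  | succ n ih =>
    intro m hm
    have hsplit : m = 2*(m/2) + m % 2 := by omega
    have hk : m/2 < 2^n := by
      have : 2^(n+1) = 2*2^n := by ring
      omega
    have htail : ∀ j, m.testBit (j+1) = (m/2).testBit j := by
      intro j; rw [Nat.testBit_add_one]
    have hrange : List.range (n+1) = 0 :: (List.range n).map Nat.succ :=
      List.range_succ_eq_map
    have hfiltermap : (List.filter m.testBit ((List.range n).map Nat.succ))
        = ((List.range n).filter (m/2).testBit).map Nat.succ := by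
      rw [List.filter_map]
      congr 1
      apply List.filter_congr
      intro j _
      simp [Function.comp, htail j]
    rcases Nat.mod_two_eq_zero_or_one m with h2 | h2
    · -- even
      have hb0 : m.testBit 0 = false := by
        simp [Nat.testBit_zero, h2]
      have hm' : m = 2*(m/2) := by omega
      rw [hrange]
      simp only [List.filter_cons, hb0]
      rw [hfiltermap, ← ih (m/2) hk, hm', pvBitIdx_double]
      have hdiv : (2*(m/2))/2 = m/2 := by omega
      simp [hdiv]
    · -- odd
      have hb0 : m.testBit 0 = true := by
        simp [Nat.testBit_zero, h2]
      have hm' : m = 2*(m/2) + 1 := by omega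
      rw [hrange]
      simp only [List.filter_cons, hb0]
      rw [hfiltermap, ← ih (m/2) hk, hm', pvBitIdx_odd]
      have hdiv : (2*(m/2) + 1)/2 = m/2 := by omega
      simp [hdiv]

theorem pvAltLoop_eq_map (c : Int) (m : Nat) :
    pvAltLoop c m = (pvBitIdx m).map
      (fun j : Nat => (PySem.Int.floordiv (j : Int) c, PySem.Int.mod (j : Int) c)) := by
  induction m using Nat.strong_induction_on with
  | _ m ih =>
    rcases Nat.eq_zero_or_pos m with h0 | h0
    · subst h0; simp [pvAltLoop, pvBitIdx]
    have hm : m ≠ 0 := by omega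
    rw [pvAltLoop, pvBitIdx, if_neg hm, if_neg hm]
    simp only [List.map_cons]
    have hlow := pv_low_pos hm
    have hbl := pv_bitLength_pos hlow
    congr 1
    · congr 2
      · omega
      · omega
    · exact ih _ (pv_rest_lt hm)

theorem pv_main (g r c : Int) : int_to_coordinates g r c = int_to_coordinates_alt g r c := by
  unfold int_to_coordinates int_to_coordinates_alt
  by_cases hn : r * c ≤ 0
  · rw [PySem.List.pyRange_one_eq_nil hn, if_pos hn]
    rfl
  · rw [if_neg hn]
    have hn' : 0 < r * c := by omega
    set n : Int := r * c with hnn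
    set N : Nat := n.toNat with hN
    set m0 : Nat := (PySem.Int.band g ((1:Int) <<< N - 1)).toNat with hm0
    -- A side
    rw [PySem.List.foldl_append_ite
      (p := fun i : Int => PySem.Int.band g ((1:Int) <<< i.toNat) ≠ 0)
      (f := fun i : Int => (PySem.Int.floordiv i c, PySem.Int.mod i c))]
    rw [PySem.List.pyRange_one]
    have hsub : (n - 0).toNat = N := by omega
    rw [hsub]
    rw [List.filter_map, List.map_map]
    have hcongr : List.filter
        ((fun i : Int => decide (PySem.Int.band g ((1:Int) <<< i.toNat) ≠ 0)) ∘ (fun k : Nat => (0:Int) + ↑k))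
        (List.range N)
        = List.filter m0.testBit (List.range N) := by
      apply List.filter_congr
      intro k hk
      have hk' : k < N := List.mem_range.mp hk
      simp only [Function.comp]
      have h1 : ((0:Int) + (k:Int)).toNat = k := by omega
      rw [h1]
      have h2 : m0.testBit k = (g.testBit k && decide (k < N)) := pv_mask_testBit g N k
      rw [h2]
      have hdk : decide (k < N) = true := by simp [hk']
      rw [hdk, Bool.and_true]
      rcases hgb : g.testBit k
      · simp [pv_cond g k, hgb]
      · simp [pv_cond g k, hgb]
    rw [hcongr]
    -- B side
    rw [pvAltLoop_eq_map]
    have hbranch2 : (if 0 ≤ g ∧ ((PySem.Int.bitLength g : Int)) ≤ n then g.toNat else m0) = m0 := by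
      split_ifs with hgb
      · exact pv_branch g N hgb.1 (by omega)
      · rfl
    rw [hbranch2, pvBitIdx_char N m0 (pv_mask_lt g N)]
    simp only [List.nil_append]
    apply List.map_congr_left
    intro k _
    simp


-- ===== VERDICT (by name: the statement is the Claim_ definition above) =====
theorem int_to_coordinates_spec : Claim_equal_int_to_coordinates := by
  unfold Claim_equal_int_to_coordinates Spec_int_to_coordinates
  intro grid rows columns _
  exact pv_main grid rows columns
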